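-- pv_equiv track=rewrite | github.com/arnokamphuis/everybody_codes | 2025/day01_part2.py | eni_truncated
-- ===== SOURCE A (Python) =====
-- def eni_truncated(N, EXP, MOD, k=5):
--     """
--     Efficiently computes the truncated 'eni' function (last k remainders) for large EXP using cycle detection.
--     - N: base number
--     - EXP: exponent (number of multiplications)
--     - MOD: modulus
--     - k: number of last remainders to keep (default 5)
--     Returns: integer formed by joining the last k remainders as described.
--     """
--     if EXP == 0:
--         return 0
--     score = 1
--     remainders = []
--     seen = dict()  # (score) -> (step, copy of remainders)
--     steps = 0
--     while steps < EXP: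
--         score = (score * N) % MOD
--         remainders.insert(0, str(score))
--         if len(remainders) > k:
--             remainders.pop()
--         key = (score, tuple(remainders))
--         if key in seen:
--             # Cycle detected
--             prev_step = seen[key]
--             cycle_len = steps - prev_step
--             remaining_steps = EXP - steps - 1
--             if cycle_len > 0:
--                 skip_cycles = remaining_steps // cycle_len
--                 steps += skip_cycles * cycle_len
--         else:
--             seen[key] = steps
--         steps += 1
--     return int(''.join(remainders)) if remainders else 0
-- ===== SOURCE B (Python) =====
-- def eni_truncated(N, EXP, MOD, k=5):
--     # Directly compute each of the last k powers N^e mod MOD with modular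
--     # exponentiation instead of iterating EXP multiplications with cycle detection.
--     if EXP <= 0:
--         return 0
--     lo = max(1, EXP - k + 1)
--     s = ''.join(str(pow(N, e, MOD)) for e in range(EXP, lo - 1, -1))
--     return int(s) if s else 0
-- ===== Notes on version B (the rewrite author's own statement) =====
-- stated objective: faster
-- what changed: Replaces A's step-by-step multiplication loop with dict-based cycle detection by a direct closed-form computation: each of the k needed remainders is pow(N, e, MOD), so there is no loop over EXP steps and no seen-states dictionary; intended as asymptotically faster (measured 34.5x at the largest size both programs finished; at the top size A times out and both hit CPython's int-digit limit).
-- outside the precondition, e.g. on eni_truncated(2, 3, 0, 5): A raises ZeroDivisionError, B raises ValueError; on eni_truncated(2, 3, -3, 5): A raises ValueError, B raises ValueError; on eni_truncated(2, 1, -3, 5): A returns -1, B returns -1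
import Mathlib
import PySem

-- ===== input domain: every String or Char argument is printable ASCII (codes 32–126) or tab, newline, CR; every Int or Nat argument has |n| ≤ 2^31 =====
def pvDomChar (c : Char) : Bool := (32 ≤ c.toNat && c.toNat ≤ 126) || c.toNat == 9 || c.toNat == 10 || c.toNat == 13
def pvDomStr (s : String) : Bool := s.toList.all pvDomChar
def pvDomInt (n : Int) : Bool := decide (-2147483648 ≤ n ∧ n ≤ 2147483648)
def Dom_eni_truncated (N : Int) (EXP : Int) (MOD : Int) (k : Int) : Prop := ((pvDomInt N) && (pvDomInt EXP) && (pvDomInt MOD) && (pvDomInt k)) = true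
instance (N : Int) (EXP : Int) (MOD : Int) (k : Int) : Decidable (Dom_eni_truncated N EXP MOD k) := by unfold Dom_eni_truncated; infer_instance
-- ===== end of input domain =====

-- B replaces A's step-by-step multiplication loop with cycle detection by direct
-- modular exponentiation of each of the k needed powers (objective: faster; the
-- timing run measured 34.5x at the largest size both programs finished).

-- ===== PORT A =====
-- one iteration of A's while-loop state update: score = (score*N) % MOD;
-- remainders.insert(0, str(score)); if len(remainders) > k: remainders.pop()
def pvStepA (N : Int) (MOD : Int) (k : Int) (st : Int × List String) : Int × List String :=
  let score' := PySem.Int.mod (st.1 * N) MOD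
  let r1 := PySem.Int.toStr score' :: st.2
  (score', if (r1.length : Int) > k then r1.dropLast else r1)

-- used by pvLoopA's decreasing_by: the cycle skip never moves steps backwards
theorem pv_skip_nonneg {remaining cycle : Int} (h0 : 0 ≤ remaining) (hc : 0 < cycle) :
    0 ≤ PySem.Int.floordiv remaining cycle * cycle := by
  rw [PySem.Int.floordiv_eq_ediv_of_pos hc]
  exact mul_nonneg (Int.ediv_nonneg h0 hc.le) hc.le

-- A's while-loop (state: score, remainders, seen, steps); returns the final remainders
def pvLoopA (N : Int) (EXP : Int) (MOD : Int) (k : Int) (score : Int) (rem : List String)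
    (seen : PySem.Dict (Int × List String) Int) (steps : Int) : List String :=
  if h : steps < EXP then
    let st := pvStepA N MOD k (score, rem)
    match seen.get? st with
    | some prev =>
        -- cycle detected
        let cycle := steps - prev
        let remaining := EXP - steps - 1
        let steps' := if 0 < cycle then steps + PySem.Int.floordiv remaining cycle * cycle else steps
        pvLoopA N EXP MOD k st.1 st.2 seen (steps' + 1)
    | none => pvLoopA N EXP MOD k st.1 st.2 (seen.insert st steps) (steps + 1)
  else rem
termination_by (EXP - steps).toNat
decreasing_by
  · split_ifs with hc
    · have := pv_skip_nonneg (remaining := EXP - steps - 1) (cycle := steps - prev) (by omega) hc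
      omega
    · omega
  · omega

-- int(''.join(remainders)): under Pre_ (MOD ≥ 1) the join is a nonempty digit string,
-- so ofStr? never returns none there; getD 0 also renders the `if remainders else 0`
def eni_truncated (N : Int) (EXP : Int) (MOD : Int) (k : Int) : Int :=
  if EXP = 0 then 0
  else
    let rem := pvLoopA N EXP MOD k 1 [] PySem.Dict.empty 0
    if rem = [] then 0 else (PySem.Int.ofStr? (PySem.Str.join "" rem)).getD 0

-- ===== PORT B =====
-- pow(N, e, MOD) is PySem.Int.powMod; every e produced by the range is ≥ 1, so e.toNat is exact
def eni_truncated_alt (N : Int) (EXP : Int) (MOD : Int) (k : Int) : Int :=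
  if EXP ≤ 0 then 0
  else
    let lo := max 1 (EXP - k + 1)
    let s := PySem.Str.join "" ((PySem.List.pyRange EXP (lo - 1) (-1)).map
        (fun e => PySem.Int.toStr (PySem.Int.powMod N e.toNat MOD)))
    if s = "" then 0 else (PySem.Int.ofStr? s).getD 0

-- ===== PRECONDITION & SPEC =====
-- Pre_ excludes MOD ≤ 0: there A raises ZeroDivisionError (MOD = 0) or, as soon as two
-- remainders are joined, ValueError from int() on a string with an inner '-' (MOD < 0);
-- on the remaining MOD < 0 inputs (a single remainder) A and B return the same value anyway.
def Pre_eni_truncated (N : Int) (EXP : Int) (MOD : Int) (k : Int) : Prop := 1 ≤ MOD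
instance (N : Int) (EXP : Int) (MOD : Int) (k : Int) : Decidable (Pre_eni_truncated N EXP MOD k) := by unfold Pre_eni_truncated; infer_instance
def pvWitness_eni_truncated : Int × Int × Int × Int := (3, 8, 7, 5)

def Spec_eni_truncated (N : Int) (EXP : Int) (MOD : Int) (k : Int) (out : Int) : Prop := out = eni_truncated_alt N EXP MOD k
instance (N : Int) (EXP : Int) (MOD : Int) (k : Int) (out : Int) : Decidable (Spec_eni_truncated N EXP MOD k out) := by unfold Spec_eni_truncated; infer_instance

-- ===== CLAIM (what is proved, stated in full; the proofs are below) =====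
def Claim_equal_eni_truncated : Prop := ∀ (N : Int) (EXP : Int) (MOD : Int) (k : Int), Dom_eni_truncated N EXP MOD k → Pre_eni_truncated N EXP MOD k → Spec_eni_truncated N EXP MOD k (eni_truncated N EXP MOD k)

-- ===== LEMMAS AND PROOFS =====

-- the n-fold iterate of A's state update, from the initial state (score=1, remainders=[])
def pvIt (N : Int) (MOD : Int) (k : Int) (n : Nat) : Int × List String :=
  (pvStepA N MOD k)^[n] (1, [])

theorem pvIt_succ (N MOD k : Int) (n : Nat) :
    pvIt N MOD k (n + 1) = pvStepA N MOD k (pvIt N MOD k n) :=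
  Function.iterate_succ_apply' _ _ _

theorem pvIt_add (N MOD k : Int) (m n : Nat) :
    pvIt N MOD k (n + m) = (pvStepA N MOD k)^[n] (pvIt N MOD k m) :=
  Function.iterate_add_apply _ _ _ _

theorem pvIt_periodic (N MOD k : Int) (b L : Nat)
    (h : pvIt N MOD k (b + L) = pvIt N MOD k b) :
    ∀ c : Nat, pvIt N MOD k (b + c * L) = pvIt N MOD k b := by
  intro c
  induction c with
  | zero => simp
  | succ c ih =>
      have h1 : b + (c + 1) * L = (c * L) + (b + L) := by ring
      have h2 : b + c * L = (c * L) + b := by ring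
      rw [h1, pvIt_add, h, ← pvIt_add, ← h2, ih]

theorem pv_toNat_mul (a b : Int) (ha : 0 ≤ a) (hb : 0 ≤ b) :
    (a * b).toNat = a.toNat * b.toNat := by
  lift a to ℕ using ha
  lift b to ℕ using hb
  rw [← Nat.cast_mul, Int.toNat_natCast, Int.toNat_natCast, Int.toNat_natCast]

-- the while-loop computes the EXP-fold iterate (cycle skipping is sound)
theorem pvLoopA_eq (N EXP MOD k : Int) :
    ∀ (n : Nat) (score : Int) (rem : List String)
      (seen : PySem.Dict (Int × List String) Int) (steps : Int),
    (EXP - steps).toNat ≤ n →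
    0 ≤ steps → steps ≤ EXP →
    (score, rem) = pvIt N MOD k steps.toNat →
    (∀ key p, seen.get? key = some p → 0 ≤ p ∧ p < steps ∧ key = pvIt N MOD k (p + 1).toNat) →
    pvLoopA N EXP MOD k score rem seen steps = (pvIt N MOD k EXP.toNat).2 := by
  intro n
  induction n with
  | zero =>
      intro score rem seen steps hn h0 hle hst _
      have hEXP : steps = EXP := by omega
      rw [pvLoopA]
      rw [dif_neg (by omega)]
      rw [← hEXP, ← hst]
  | succ n ih =>
      intro score rem seen steps hn h0 hle hst hseen
      rw [pvLoopA]
      by_cases h : steps < EXP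
      · rw [dif_pos h]
        have hstep : pvStepA N MOD k (score, rem) = pvIt N MOD k (steps + 1).toNat := by
          have h1 : (steps + 1).toNat = steps.toNat + 1 := by omega
          rw [h1, pvIt_succ, ← hst]
        cases hget : seen.get? (pvStepA N MOD k (score, rem)) with
        | none =>
            simp only [hget]
            refine ih _ _ _ (steps + 1) (by omega) (by omega) (by omega) ?_ ?_
            · rw [← hstep]
            · intro key p hkp
              rw [PySem.Dict.get?_insert] at hkp
              by_cases hk : key = pvStepA N MOD k (score, rem)
              · rw [if_pos (by simp [hk])] at hkp
                cases hkp
                exact ⟨h0, by omega, by rw [hk, hstep]⟩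
              · rw [if_neg (by simp [hk])] at hkp
                obtain ⟨hp0, hps, hpe⟩ := hseen key p hkp
                exact ⟨hp0, by omega, hpe⟩
        | some prev =>
            simp only [hget]
            obtain ⟨hp0, hps, hpe⟩ := hseen _ _ hget
            have hcyc : 0 < steps - prev := by omega
            rw [if_pos hcyc]
            generalize hqdef : PySem.Int.floordiv (EXP - steps - 1) (steps - prev) = q
            have hq0 : 0 ≤ q := by
              rw [← hqdef, PySem.Int.floordiv_eq_ediv_of_pos hcyc]
              exact Int.ediv_nonneg (by omega) (by omega)
            have hqle : q * (steps - prev) ≤ EXP - steps - 1 := by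
              have hmul := PySem.Int.floordiv_mul_add_mod (EXP - steps - 1) (steps - prev)
              have hm0 := PySem.Int.mod_nonneg (EXP - steps - 1) hcyc
              rw [hqdef] at hmul
              omega
            have hqc0 : 0 ≤ q * (steps - prev) := mul_nonneg hq0 (by omega)
            have hdist : (q + 1) * (steps - prev) = q * (steps - prev) + (steps - prev) := by ring
            have hmulN : ((q + 1) * (steps - prev)).toNat = (q + 1).toNat * (steps - prev).toNat :=
              pv_toNat_mul _ _ (by omega) (by omega)
            have hidx : (steps + q * (steps - prev) + 1).toNat
                = (prev + 1).toNat + (q + 1).toNat * (steps - prev).toNat := by omega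
            have hlink : pvIt N MOD k (prev + 1).toNat = pvIt N MOD k (steps + 1).toNat := by
              rw [← hpe, hstep]
            have hper : pvIt N MOD k ((prev + 1).toNat + (steps - prev).toNat)
                = pvIt N MOD k (prev + 1).toNat := by
              have hbL : (prev + 1).toNat + (steps - prev).toNat = (steps + 1).toNat := by omega
              rw [hbL, ← hlink]
            have hstate : pvIt N MOD k (steps + q * (steps - prev) + 1).toNat
                = pvIt N MOD k (steps + 1).toNat := by
              rw [hidx, pvIt_periodic N MOD k _ _ hper, hlink]
            refine ih _ _ _ (steps + q * (steps - prev) + 1)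
              (by omega) (by omega) (by omega) ?_ ?_
            · rw [hstate, ← hstep]
            · intro key p hkp
              obtain ⟨a1, a2, a3⟩ := hseen key p hkp
              exact ⟨a1, by omega, a3⟩
      · rw [dif_neg h]
        have hEXP : steps = EXP := by omega
        rw [← hEXP, ← hst]

-- one window step: prepend the new remainder, pop the oldest when over k
theorem pv_window_step (g : Nat → String) (k : Int) (n : Nat) :
    (if ((g (n + 1) :: (List.range (min k.toNat n)).map (fun j => g (n - j))).length : Int) > k
     then (g (n + 1) :: (List.range (min k.toNat n)).map (fun j => g (n - j))).dropLast
     else g (n + 1) :: (List.range (min k.toNat n)).map (fun j => g (n - j)))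
    = (List.range (min k.toNat (n + 1))).map (fun j => g (n + 1 - j)) := by
  have hcons : ∀ m : Nat, g (n + 1) :: (List.range m).map (fun j => g (n - j))
      = (List.range (m + 1)).map (fun j => g (n + 1 - j)) := by
    intro m
    rw [List.range_succ_eq_map, List.map_cons, List.map_map]
    simp [Function.comp, Nat.succ_sub_succ]
  have hlen : ∀ m : Nat, ((List.range m).map (fun j : Nat => g (n + 1 - j))).length = m := by
    intro m; rw [List.length_map, List.length_range]
  by_cases hk : (n + 1 : Int) ≤ k
  · have h1 : min k.toNat n = n := by omega
    have h2 : min k.toNat (n + 1) = n + 1 := by omega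
    rw [h1, h2, hcons n, if_neg (by rw [List.length_map, List.length_range]; push_cast; omega)]
  · have h1 : min k.toNat n = k.toNat := by omega
    have h2 : min k.toNat (n + 1) = k.toNat := by omega
    rw [h1, h2, hcons k.toNat,
        if_pos (by rw [List.length_map, List.length_range]; push_cast; omega)]
    rw [List.range_succ, List.map_append, List.map_singleton, List.dropLast_concat]

-- closed form of the n-fold iterate: score is N^n % MOD, the window is the
-- last min(k, n) remainders, newest first
theorem pvIt_spec (N MOD k : Int) (hM : 0 < MOD) : ∀ n : Nat,
    pvIt N MOD k n = ((if n = 0 then 1 else PySem.Int.mod (N ^ n) MOD),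
      (List.range (min k.toNat n)).map
        (fun j => PySem.Int.toStr (PySem.Int.mod (N ^ (n - j)) MOD))) := by
  intro n
  induction n with
  | zero => simp [pvIt]
  | succ n ih =>
      rw [pvIt_succ, ih, pvStepA]
      have hscore : PySem.Int.mod ((if n = 0 then 1 else PySem.Int.mod (N ^ n) MOD) * N) MOD
          = PySem.Int.mod (N ^ (n + 1)) MOD := by
        by_cases hn : n = 0
        · simp [hn]
        · rw [if_neg hn]
          rw [PySem.Int.mod_eq_emod_of_pos hM, PySem.Int.mod_eq_emod_of_pos hM,
              PySem.Int.mod_eq_emod_of_pos hM]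
          conv_lhs => rw [Int.mul_emod, Int.emod_emod_of_dvd _ dvd_rfl]
          conv_rhs => rw [pow_succ, Int.mul_emod]
      simp only [hscore]
      refine Prod.ext (by simp) ?_
      simpa using pv_window_step (fun m => PySem.Int.toStr (PySem.Int.mod (N ^ m) MOD)) k n

-- B's descending range of exponents produces exactly A's final window
theorem pv_lists_eq (N EXP MOD k : Int) (hE : 1 ≤ EXP) (hM : 0 < MOD) :
    (PySem.List.pyRange EXP (max 1 (EXP - k + 1) - 1) (-1)).map
        (fun e => PySem.Int.toStr (PySem.Int.powMod N e.toNat MOD))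
    = (pvIt N MOD k EXP.toNat).2 := by
  rw [pvIt_spec N MOD k hM, PySem.List.pyRange_neg_one, List.map_map]
  have hlen : (EXP - (max 1 (EXP - k + 1) - 1)).toNat = min k.toNat EXP.toNat := by omega
  rw [hlen]
  apply List.map_congr_left
  intro j hj
  rw [List.mem_range] at hj
  simp only [Function.comp_apply]
  rw [PySem.Int.powMod_eq]
  have h1 : (EXP - (j : Int)).toNat = EXP.toNat - j := by omega
  rw [h1]

-- ===== VERDICT (by name: the statement is the Claim_ definition above) =====
theorem eni_truncated_spec : Claim_equal_eni_truncated := by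
  intro N EXP MOD k _ hpre
  have hM : 0 < MOD := hpre
  unfold Spec_eni_truncated eni_truncated eni_truncated_alt
  by_cases hE : 1 ≤ EXP
  · rw [if_neg (show ¬ EXP = 0 by omega), if_neg (show ¬ EXP ≤ 0 by omega)]
    have hloop : pvLoopA N EXP MOD k 1 [] PySem.Dict.empty 0 = (pvIt N MOD k EXP.toNat).2 := by
      refine pvLoopA_eq N EXP MOD k (EXP - 0).toNat 1 [] PySem.Dict.empty 0
        (by omega) (by omega) (by omega) ?_ ?_
      · simp [pvIt]
      · intro key p hkp
        rw [PySem.Dict.get?_empty] at hkp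
        cases hkp
    have hlist := pv_lists_eq N EXP MOD k hE hM
    simp only [hloop, hlist]
    by_cases hnil : (pvIt N MOD k EXP.toNat).2 = []
    · rw [hnil]
      rfl
    · rw [if_neg hnil]
      by_cases hs : PySem.Str.join "" (pvIt N MOD k EXP.toNat).2 = ""
      · rw [if_pos hs, hs]
        rfl
      · rw [if_neg hs]
  · rw [if_pos (show EXP ≤ 0 by omega)]
    by_cases hz : EXP = 0
    · rw [if_pos hz]
    · rw [if_neg hz]
      have hl : pvLoopA N EXP MOD k 1 [] PySem.Dict.empty 0 = [] := by
        rw [pvLoopA, dif_neg (by omega)]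
      simp [hl]
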